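-- pv_equiv track=rewrite | github.com/nikcholer/cryptic-solver | backend/app/runtime/adapter.py | _find_multiword_indicator_positions
-- ===== SOURCE A (Python) =====
-- HIDDEN_INDICATORS = [
--     'buried in',
--     'concealed in',
--     'contained in',
--     'found in',
--     'held by',
--     'hidden in',
--     'inside',
--     'within',
-- ]
--
-- CHARADE_LINKERS = ['with', 'after', 'before', 'beside', 'next to']
--
-- INITIALS_INDICATORS = [
--     'for starters',
--     'at first',
--     'first off',
--     'initially',
--     'to start',
-- ]
--
-- def _find_multiword_indicator_positions(words: list[str]) -> dict[str, int]:
--     lowered_words = [word.lower() for word in words]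
--     positions: dict[str, int] = {}
--     for phrase in HIDDEN_INDICATORS + CHARADE_LINKERS + INITIALS_INDICATORS:
--         phrase_words = phrase.split()
--         for index in range(len(lowered_words) - len(phrase_words) + 1):
--             if lowered_words[index:index + len(phrase_words)] == phrase_words:
--                 positions[phrase] = index
--                 break
--     return positions
-- ===== SOURCE B (Python) =====
-- HIDDEN_INDICATORS = [
--     'buried in',
--     'concealed in',
--     'contained in',
--     'found in',
--     'held by',
--     'hidden in',
--     'inside',
--     'within',
-- ]
--
-- CHARADE_LINKERS = ['with', 'after', 'before', 'beside', 'next to']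
--
-- INITIALS_INDICATORS = [
--     'for starters',
--     'at first',
--     'first off',
--     'initially',
--     'to start',
-- ]
--
-- _ALL_PHRASES = HIDDEN_INDICATORS + CHARADE_LINKERS + INITIALS_INDICATORS
--
-- # index built once: first word of a phrase -> phrases starting with that word
-- _BY_FIRST_WORD: dict[str, list[str]] = {}
-- for _p in _ALL_PHRASES:
--     _BY_FIRST_WORD.setdefault(_p.split()[0], []).append(_p)
--
--
-- def _find_multiword_indicator_positions(words: list[str]) -> dict[str, int]:
--     lowered = [w.lower() for w in words]
--     found: dict[str, int] = {}
--     for i, w in enumerate(lowered):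
--         for phrase in _BY_FIRST_WORD.get(w, []):
--             if phrase not in found:
--                 pw = phrase.split()
--                 if lowered[i:i + len(pw)] == pw:
--                     found[phrase] = i
--     return {p: found[p] for p in _ALL_PHRASES if p in found}
-- ===== Notes on version B (the rewrite author's own statement) =====
-- stated objective: faster
-- what changed: A scans the whole word list once per indicator phrase (18 nested scans); B builds a first-word-to-phrases index once and makes a single pass over the words, checking only the phrases whose first word matches the current word, then emits the result in phrase order.
import Mathlib
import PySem

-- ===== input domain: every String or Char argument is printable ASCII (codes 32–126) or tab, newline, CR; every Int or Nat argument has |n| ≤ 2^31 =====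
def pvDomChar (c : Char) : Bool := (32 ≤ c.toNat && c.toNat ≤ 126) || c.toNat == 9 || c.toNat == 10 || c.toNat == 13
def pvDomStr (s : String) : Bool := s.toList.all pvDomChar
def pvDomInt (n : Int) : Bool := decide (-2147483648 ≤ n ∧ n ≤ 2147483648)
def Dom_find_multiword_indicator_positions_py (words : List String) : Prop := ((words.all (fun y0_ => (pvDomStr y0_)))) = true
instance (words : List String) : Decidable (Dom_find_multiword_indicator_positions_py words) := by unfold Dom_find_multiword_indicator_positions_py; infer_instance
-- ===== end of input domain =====

-- B replaces A's per-phrase scan of the word list by a single pass over the words with a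
-- first-word → phrases index built once (objective: faster by a constant factor).

-- ===== PORT A =====
def pvHiddenIndicators : List String :=
  ["buried in", "concealed in", "contained in", "found in", "held by", "hidden in", "inside", "within"]

def pvCharadeLinkers : List String := ["with", "after", "before", "beside", "next to"]

def pvInitialsIndicators : List String :=
  ["for starters", "at first", "first off", "initially", "to start"]

-- 'for index in range(…): if lowered[index:index+len(pw)] == pw: positions[phrase] = index; break'
def pvLoopA (lowered pw : List String) (phrase : String) (positions : PySem.Dict String Int) :
    List Int → PySem.Dict String Int
  | [] => positions
  | index :: rest =>
    if PySem.List.slice lowered (some index) (some (index + (pw.length : Int))) == pw then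
      positions.insert phrase index
    else pvLoopA lowered pw phrase positions rest

def find_multiword_indicator_positions_py (words : List String) : List (String × Int) :=
  let lowered := words.map PySem.Str.lower
  ((pvHiddenIndicators ++ pvCharadeLinkers ++ pvInitialsIndicators).foldl
    (fun positions phrase =>
      let pw := PySem.Str.split₀ phrase
      pvLoopA lowered pw phrase positions
        (PySem.List.pyRange 0 ((lowered.length : Int) - (pw.length : Int) + 1) 1))
    PySem.Dict.empty).items

-- ===== PORT B =====
def pvAllPhrases : List String := pvHiddenIndicators ++ pvCharadeLinkers ++ pvInitialsIndicators

-- module-level index: first word of a phrase -> phrases starting with that word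
def pvByFirstWord : PySem.Dict String (List String) :=
  pvAllPhrases.foldl
    (fun m p => m.modify ((PySem.Str.split₀ p).headD "") [] (fun l => l ++ [p]))
    PySem.Dict.empty

def find_multiword_indicator_positions_py_alt (words : List String) : List (String × Int) :=
  let lowered := words.map PySem.Str.lower
  let found := (PySem.List.enumerate lowered 0).foldl
    (fun (found : PySem.Dict String Int) iw =>
      (pvByFirstWord.getD iw.2 []).foldl
        (fun (found : PySem.Dict String Int) phrase =>
          if found.contains phrase then found
          else
            let pw := PySem.Str.split₀ phrase
            if PySem.List.slice lowered (some iw.1) (some (iw.1 + (pw.length : Int))) == pw then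
              found.insert phrase iw.1
            else found)
        found)
    PySem.Dict.empty
  -- '{p: found[p] for p in _ALL_PHRASES if p in found}'; under the contains-guard
  -- 'found[p]' is exactly 'found.getD p 0'
  (pvAllPhrases.foldl
    (fun (d : PySem.Dict String Int) p =>
      if found.contains p then d.insert p (found.getD p 0) else d)
    PySem.Dict.empty).items

-- ===== PRECONDITION & SPEC =====
def Spec_find_multiword_indicator_positions_py (words : List String) (out : List (String × Int)) : Prop := out = find_multiword_indicator_positions_py_alt words
instance (words : List String) (out : List (String × Int)) : Decidable (Spec_find_multiword_indicator_positions_py words out) := by unfold Spec_find_multiword_indicator_positions_py; infer_instance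

-- ===== CLAIM (what is proved, stated in full; the proofs are below) =====
def Claim_equal_find_multiword_indicator_positions_py : Prop := ∀ (words : List String), Dom_find_multiword_indicator_positions_py words → Spec_find_multiword_indicator_positions_py words (find_multiword_indicator_positions_py words)

-- ===== LEMMAS AND PROOFS =====

-- does the phrase's word list pw occur in lowered at position i?
def pvMatch (lowered pw : List String) (i : Nat) : Bool :=
  (lowered.drop i).take pw.length == pw

-- first occurrence position of pw in lowered
def pvFirst (lowered pw : List String) : Option Nat :=
  (List.range lowered.length).find? (pvMatch lowered pw)

-- the common reference value of both programs
def pvRef (lowered : List String) : List (String × Int) :=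
  pvAllPhrases.filterMap
    (fun p => (pvFirst lowered (PySem.Str.split₀ p)).map (fun i => (p, (i : Int))))

-- generic: fold inserting fresh distinct keys (or skipping) = append of filterMap
theorem pv_foldl_match_insert {V : Type} (f : String → Option V)
    (step : PySem.Dict String V → String → PySem.Dict String V)
    (hsome : ∀ d p v, f p = some v → step d p = d.insert p v)
    (hnone : ∀ d p, f p = none → step d p = d) :
    ∀ (ps : List String) (d : PySem.Dict String V), ps.Nodup →
    (∀ p ∈ ps, d.contains p = false) →
    (ps.foldl step d).items
      = d.items ++ ps.filterMap (fun p => (f p).map (fun v => (p, v))) := by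
  intro ps
  induction ps with
  | nil => intro d _ _; simp
  | cons q ps ih =>
    intro d hnd hfresh
    rcases List.nodup_cons.mp hnd with ⟨hq, hnd'⟩
    simp only [List.foldl_cons, List.filterMap_cons]
    cases hf : f q with
    | none =>
      rw [hnone d q hf, ih d hnd' (fun p hp => hfresh p (List.mem_cons_of_mem _ hp))]
      simp
    | some v =>
      rw [hsome d q v hf, ih (d.insert q v) hnd' ?_]
      · rw [PySem.Dict.items_insert_of_not_contains _ v (hfresh q (List.mem_cons_self))]
        simp
      · intro p hp
        rw [PySem.Dict.contains_insert]
        have : p ≠ q := fun h => hq (h ▸ hp)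
        simp [this, hfresh p (List.mem_cons_of_mem _ hp)]

theorem pv_find?_range_ext (p : Nat → Bool) (m n : Nat) (hmn : m ≤ n)
    (h : ∀ j, m ≤ j → j < n → p j = false) :
    (List.range m).find? p = (List.range n).find? p := by
  have : n = m + (n - m) := by omega
  rw [this, List.range_add, List.find?_append]
  have hnone : ((List.range (n - m)).map (fun k => m + k)).find? p = none := by
    rw [List.find?_eq_none]
    intro x hx
    simp only [List.mem_map, List.mem_range] at hx
    obtain ⟨k, hk, rfl⟩ := hx
    simp [h (m + k) (by omega) (by omega)]
  rw [hnone]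
  cases (List.range m).find? p <;> simp

-- a slice-match beyond the last feasible start position is impossible
theorem pv_match_false_of_late (lowered pw : List String) (j : Nat)
    (hk : 1 ≤ pw.length) (hlate : (lowered.length : Int) - pw.length < (j : Int)) :
    pvMatch lowered pw j = false := by
  unfold pvMatch
  by_contra h
  have heq : (lowered.drop j).take pw.length = pw := by
    have := Bool.of_not_eq_false h
    exact beq_iff_eq.mp this
  have hlen := congrArg List.length heq
  simp only [List.length_take, List.length_drop] at hlen
  omega

-- the break-loop returns the insert at the first hit / nothing if no hit
theorem pv_loopA_some (lowered pw : List String) (phrase : String) (positions : PySem.Dict String Int)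
    (idxs : List Int) (i : Int)
    (h : idxs.find? (fun index => PySem.List.slice lowered (some index) (some (index + (pw.length : Int))) == pw) = some i) :
    pvLoopA lowered pw phrase positions idxs = positions.insert phrase i := by
  induction idxs with
  | nil => simp at h
  | cons x rest ih =>
    rw [List.find?_cons] at h
    by_cases hx : (PySem.List.slice lowered (some x) (some (x + (pw.length : Int))) == pw) = true
    · simp only [hx] at h
      cases h
      simp [pvLoopA, hx]
    · simp only [hx] at h
      simp only [pvLoopA]
      rw [if_neg hx]
      exact ih h

theorem pv_loopA_none (lowered pw : List String) (phrase : String) (positions : PySem.Dict String Int)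
    (idxs : List Int)
    (h : idxs.find? (fun index => PySem.List.slice lowered (some index) (some (index + (pw.length : Int))) == pw) = none) :
    pvLoopA lowered pw phrase positions idxs = positions := by
  induction idxs with
  | nil => simp [pvLoopA]
  | cons x rest ih =>
    rw [List.find?_cons] at h
    simp only [pvLoopA]
    by_cases hx : (PySem.List.slice lowered (some x) (some (x + (pw.length : Int))) == pw) = true
    · simp [hx] at h
    · rw [if_neg hx]
      exact ih (by simpa [hx] using h)

-- A's inner break-loop scan computes the first occurrence
theorem pv_find_eq_first (lowered pw : List String) (hk : 1 ≤ pw.length) :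
    (PySem.List.pyRange 0 ((lowered.length : Int) - (pw.length : Int) + 1) 1).find?
      (fun index => PySem.List.slice lowered (some index) (some (index + (pw.length : Int))) == pw)
    = (pvFirst lowered pw).map (fun i => (i : Int)) := by
  rw [PySem.List.pyRange_one, List.find?_map]
  have hpred : ((fun index => PySem.List.slice lowered (some index) (some (index + (pw.length : Int))) == pw)
      ∘ (fun k : Nat => (0 : Int) + k)) = pvMatch lowered pw := by
    funext k
    simp only [Function.comp_apply, zero_add, PySem.List.slice_natCast_add, pvMatch]
  rw [hpred]
  unfold pvFirst
  have hr : ((((lowered.length : Int) - pw.length + 1) - 0).toNat) ≤ lowered.length := by omega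
  rw [pv_find?_range_ext (pvMatch lowered pw) _ lowered.length hr ?_]
  · cases (List.range lowered.length).find? (pvMatch lowered pw) <;> simp
  · intro j hj _
    exact pv_match_false_of_late lowered pw j hk (by omega)

theorem pv_phrases_nodup : pvAllPhrases.Nodup := by decide

theorem pv_phrases_len : ∀ p ∈ pvAllPhrases, 1 ≤ (PySem.Str.split₀ p).length := by decide

theorem pv_A_eq_ref (words : List String) :
    find_multiword_indicator_positions_py words = pvRef (words.map PySem.Str.lower) := by
  unfold find_multiword_indicator_positions_py pvRef
  simp only []
  rw [show pvHiddenIndicators ++ pvCharadeLinkers ++ pvInitialsIndicators = pvAllPhrases from rfl]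
  have h1 := pv_foldl_match_insert
      (fun phrase => (PySem.List.pyRange 0 (((words.map PySem.Str.lower).length : Int) - ((PySem.Str.split₀ phrase).length : Int) + 1) 1).find?
        (fun index => PySem.List.slice (words.map PySem.Str.lower) (some index) (some (index + ((PySem.Str.split₀ phrase).length : Int))) == PySem.Str.split₀ phrase))
      (fun positions phrase => pvLoopA (words.map PySem.Str.lower) (PySem.Str.split₀ phrase) phrase positions
        (PySem.List.pyRange 0 (((words.map PySem.Str.lower).length : Int) - ((PySem.Str.split₀ phrase).length : Int) + 1) 1))
      (fun d p v h => pv_loopA_some _ _ _ _ _ _ h)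
      (fun d p h => pv_loopA_none _ _ _ _ _ h)
      pvAllPhrases PySem.Dict.empty pv_phrases_nodup (fun p _ => PySem.Dict.contains_empty p)
  refine Eq.trans h1 ?_
  rw [show (PySem.Dict.empty : PySem.Dict String Int).items = [] from rfl, List.nil_append]
  apply List.filterMap_congr
  intro p hp
  beta_reduce
  rw [pv_find_eq_first _ _ (pv_phrases_len p hp), Option.map_map]
  rfl


-- if pw occurs at j, the word at j is pw's first word
theorem pv_match_head (lowered pw : List String) (j : Nat)
    (hk : 1 ≤ pw.length) (hj : j < lowered.length) (hm : pvMatch lowered pw j = true) :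
    pw.headD "" = lowered[j] := by
  unfold pvMatch at hm
  have heq : (lowered.drop j).take pw.length = pw := beq_iff_eq.mp hm
  cases pw with
  | nil => simp at hk
  | cons w pwt =>
    rw [List.drop_eq_getElem_cons hj] at heq
    simp only [List.length_cons, List.take_succ_cons] at heq
    have := List.head_eq_of_cons_eq heq
    simp [this]

-- every phrase is in the bucket of its own first word (closed fact about the literal index)
theorem pv_bucket_mem : ∀ p ∈ pvAllPhrases,
    p ∈ pvByFirstWord.getD ((PySem.Str.split₀ p).headD "") [] := by decide

-- every bucket of the literal index is duplicate-free
theorem pv_bucket_nodup (w : String) : (pvByFirstWord.getD w []).Nodup := by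
  rw [PySem.Dict.getD_eq_get?_getD]
  cases h : pvByFirstWord.get? w with
  | none => simp
  | some v =>
    have hv : (w, v) ∈ pvByFirstWord.items := PySem.Dict.mem_items_of_get?_eq_some _ h
    have hall : ∀ q ∈ pvByFirstWord.items, q.2.Nodup := by decide
    simpa using hall _ hv

-- effect of one position's bucket scan on a single phrase's entry
theorem pv_inner_fold (lowered : List String) (i : Int) (cs : List String) :
    ∀ (d : PySem.Dict String Int) (p : String), cs.Nodup →
    ((cs.foldl (fun (found : PySem.Dict String Int) phrase =>
        if found.contains phrase then found
        else if PySem.List.slice lowered (some i) (some (i + ((PySem.Str.split₀ phrase).length : Int))) == PySem.Str.split₀ phrase then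
          found.insert phrase i
        else found) d).get? p)
    = if p ∈ cs ∧ d.get? p = none ∧
          (PySem.List.slice lowered (some i) (some (i + ((PySem.Str.split₀ p).length : Int))) == PySem.Str.split₀ p) = true
      then some i else d.get? p := by
  induction cs with
  | nil => intro d p _; simp
  | cons q cs ih =>
    intro d p hnd
    rcases List.nodup_cons.mp hnd with ⟨hq, hnd'⟩
    simp only [List.foldl_cons]
    by_cases hpq : p = q
    · subst hpq
      cases hc : d.get? p with
      | some v =>
        have hcon : d.contains p = true := by
          rw [PySem.Dict.contains_eq_isSome_get?, hc]; rfl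
        rw [if_pos hcon, ih d p hnd']
        simp [hq, hc]
      | none =>
        have hcon : d.contains p = false := by
          rw [PySem.Dict.contains_eq_isSome_get?, hc]; rfl
        rw [if_neg (by simp [hcon])]
        by_cases hcond : (PySem.List.slice lowered (some i) (some (i + ((PySem.Str.split₀ p).length : Int))) == PySem.Str.split₀ p) = true
        · rw [if_pos hcond, ih _ p hnd']
          simp [hq, PySem.Dict.get?_insert_self, hcond]
        · rw [if_neg hcond, ih d p hnd']
          simp [hq, hc, hcond]
    · have hd' : ∀ (d' : PySem.Dict String Int),
          (if d.contains q then d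
           else if PySem.List.slice lowered (some i) (some (i + ((PySem.Str.split₀ q).length : Int))) == PySem.Str.split₀ q then
             d.insert q i else d).get? p = d.get? p := by
        intro _
        split_ifs with h1 h2
        · rfl
        · exact PySem.Dict.get?_insert_of_ne _ _ hpq
        · rfl
      rw [ih _ p hnd', hd' d]
      simp [List.mem_cons, hpq]


-- loop invariant of B's single pass: after the first j positions, each phrase's entry
-- is its first occurrence among positions < j
theorem pv_outer_inv (lowered : List String) (p : String) (hp : p ∈ pvAllPhrases) :
    ∀ (j : Nat), j ≤ lowered.length →
    (((PySem.List.enumerate lowered 0).take j).foldl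
      (fun (found : PySem.Dict String Int) iw =>
        (pvByFirstWord.getD iw.2 []).foldl
          (fun (found : PySem.Dict String Int) phrase =>
            if found.contains phrase then found
            else if PySem.List.slice lowered (some iw.1) (some (iw.1 + ((PySem.Str.split₀ phrase).length : Int))) == PySem.Str.split₀ phrase then
              found.insert phrase iw.1
            else found)
          found)
      PySem.Dict.empty).get? p
    = ((List.range j).find? (pvMatch lowered (PySem.Str.split₀ p))).map (fun i => (i : Int)) := by
  intro j
  induction j with
  | zero => intro _; simp [PySem.Dict.get?_empty]
  | succ j ih =>
    intro hj
    have hjn : j < lowered.length := by omega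
    have hlen : j < (PySem.List.enumerate lowered 0).length := by
      rw [PySem.List.length_enumerate]; exact hjn
    rw [List.take_add_one, List.getElem?_eq_getElem hlen, PySem.List.getElem_enumerate]
    simp only [Option.toList_some, List.foldl_append, List.foldl_cons, List.foldl_nil, zero_add]
    rw [pv_inner_fold lowered _ _ _ p (pv_bucket_nodup _)]
    rw [ih (by omega)]
    have hcond : (PySem.List.slice lowered (some (j : Int)) (some ((j : Int) + ((PySem.Str.split₀ p).length : Int))) == PySem.Str.split₀ p)
        = pvMatch lowered (PySem.Str.split₀ p) j := by
      rw [PySem.List.slice_natCast_add]; rfl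
    rw [hcond, List.range_succ, List.find?_append]
    by_cases hm : pvMatch lowered (PySem.Str.split₀ p) j = true
    · cases h0 : (List.range j).find? (pvMatch lowered (PySem.Str.split₀ p)) with
      | some v => simp [hm]
      | none =>
        have hhead := pv_match_head lowered (PySem.Str.split₀ p) j (pv_phrases_len p hp) hjn hm
        have hmem : p ∈ pvByFirstWord.getD lowered[j] [] := by
          rw [← hhead]; exact pv_bucket_mem p hp
        simp [hm, hmem]
    · have hm' : pvMatch lowered (PySem.Str.split₀ p) j = false := by
        simpa using hm
      cases h0 : (List.range j).find? (pvMatch lowered (PySem.Str.split₀ p)) with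
      | some v => simp [hm']
      | none => simp [hm']

theorem pv_B_eq_ref (words : List String) :
    find_multiword_indicator_positions_py_alt words = pvRef (words.map PySem.Str.lower) := by
  unfold find_multiword_indicator_positions_py_alt pvRef
  simp only []
  set F := (PySem.List.enumerate (words.map PySem.Str.lower) 0).foldl
      (fun (found : PySem.Dict String Int) iw =>
        (pvByFirstWord.getD iw.2 []).foldl
          (fun (found : PySem.Dict String Int) phrase =>
            if found.contains phrase then found
            else if PySem.List.slice (words.map PySem.Str.lower) (some iw.1) (some (iw.1 + ((PySem.Str.split₀ phrase).length : Int))) == PySem.Str.split₀ phrase then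
              found.insert phrase iw.1
            else found)
          found)
      PySem.Dict.empty with hF
  have h1 := pv_foldl_match_insert
      (fun p => F.get? p)
      (fun (d : PySem.Dict String Int) p => if F.contains p then d.insert p (F.getD p 0) else d)
      (fun d p v h => by
        have h' : F.get? p = some v := h
        beta_reduce
        rw [if_pos (by rw [PySem.Dict.contains_eq_isSome_get?, h']; rfl),
            PySem.Dict.getD_eq_get?_getD, h']
        rfl)
      (fun d p h => by
        have h' : F.get? p = none := h
        beta_reduce
        rw [if_neg (by rw [PySem.Dict.contains_eq_isSome_get?, h']; simp)])
      pvAllPhrases PySem.Dict.empty pv_phrases_nodup (fun p _ => PySem.Dict.contains_empty p)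
  refine Eq.trans h1 ?_
  rw [show (PySem.Dict.empty : PySem.Dict String Int).items = [] from rfl, List.nil_append]
  apply List.filterMap_congr
  intro p hp
  beta_reduce
  have h2 := pv_outer_inv (words.map PySem.Str.lower) p hp (words.map PySem.Str.lower).length le_rfl
  have h3 : (PySem.List.enumerate (words.map PySem.Str.lower) 0).take (words.map PySem.Str.lower).length
      = PySem.List.enumerate (words.map PySem.Str.lower) 0 := by
    conv_lhs => rw [← PySem.List.length_enumerate (words.map PySem.Str.lower) 0]
    exact List.take_length
  rw [h3] at h2
  have h4 : F.get? p = (pvFirst (words.map PySem.Str.lower) (PySem.Str.split₀ p)).map (fun i => (i : Int)) := by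
    rw [hF]; exact h2
  rw [h4, Option.map_map]
  rfl

-- ===== VERDICT (by name: the statement is the Claim_ definition above) =====
theorem find_multiword_indicator_positions_py_spec : Claim_equal_find_multiword_indicator_positions_py := by
  intro words _
  unfold Spec_find_multiword_indicator_positions_py
  rw [pv_A_eq_ref, pv_B_eq_ref]
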